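-- pv_equiv track=rewrite | github.com/Amirarsalan-sn/simple_covert_channel | receiver.py | convert_num_code
-- ===== SOURCE A (Python) =====
-- def convert_num_code(number):
--     result = ''
--     digits = 8
--     digits -= 1
--     while digits >= 0:
--         if (number >> digits) % 2 == 0:
--             result += ' '
--         else:
--             result += '\t'
--         digits -= 1
--
--     return result
-- ===== SOURCE B (Python) =====
-- def convert_num_code(number):
--     # idiomatic: format the low 8 bits once, then map '0'/'1' to ' '/'\t' in one translate call
--     bits = format(number % 256, '08b')
--     return bits.translate(str.maketrans('01', ' \t'))
-- ===== Notes on version B (the rewrite author's own statement) =====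
-- stated objective: idiomatic
-- what changed: Replaces the manual 8-iteration shift-and-append while loop with a single format(number % 256, '08b') producing the bit string and one str.translate call mapping '0'/'1' to ' '/' '.
import Mathlib
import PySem

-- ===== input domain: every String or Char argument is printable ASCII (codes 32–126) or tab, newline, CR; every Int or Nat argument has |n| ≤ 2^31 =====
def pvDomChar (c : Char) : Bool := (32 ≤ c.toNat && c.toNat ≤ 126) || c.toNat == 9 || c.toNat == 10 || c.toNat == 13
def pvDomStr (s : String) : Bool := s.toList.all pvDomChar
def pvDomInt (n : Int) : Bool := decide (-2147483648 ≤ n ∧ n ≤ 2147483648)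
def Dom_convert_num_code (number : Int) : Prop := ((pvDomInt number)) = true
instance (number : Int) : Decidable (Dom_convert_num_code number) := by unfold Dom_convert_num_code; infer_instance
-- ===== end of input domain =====

-- B replaces A's manual shift-and-append while loop by formatting the low 8 bits once and
-- translating '0'/'1' to ' '/'\t' (objective: idiomatic).

-- ===== PORT A =====
-- the while loop: fuel = digits + 1, so fuel = 8 means current digit is 7
def convertLoopA (number : Int) (acc : List Char) : Nat → List Char
  | 0 => acc
  | Nat.succ d =>
      convertLoopA number
        (acc ++ [if PySem.Int.mod (number >>> d) 2 = 0 then ' ' else '\t']) d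

def convert_num_code (number : Int) : String :=
  String.ofList (convertLoopA number [] 8)

-- ===== PORT B =====
-- `number % 256` is Python floored mod → PySem.Int.mod;
-- format(m, '08b') = zero-pad toBinChars m to width 8 (m is in [0, 256), no sign)
def convert_num_code_alt (number : Int) : String :=
  let m := PySem.Int.mod number 256
  let raw := PySem.Int.toBinChars m
  let bits := List.replicate (8 - raw.length) '0' ++ raw
  String.ofList (bits.map (fun c => if c = '0' then ' ' else if c = '1' then '\t' else c))

-- ===== PRECONDITION & SPEC =====
def Spec_convert_num_code (number : Int) (out : String) : Prop := out = convert_num_code_alt number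
instance (number : Int) (out : String) : Decidable (Spec_convert_num_code number out) := by unfold Spec_convert_num_code; infer_instance

-- ===== CLAIM (what is proved, stated in full; the proofs are below) =====
def Claim_equal_convert_num_code : Prop := ∀ (number : Int), Dom_convert_num_code number → Spec_convert_num_code number (convert_num_code number)

-- ===== LEMMAS AND PROOFS =====

-- each of A's bits depends only on number mod 256
theorem convertLoopA_mod (n : Int) :
    convertLoopA n [] 8 = convertLoopA (n % 256) [] 8 := by
  simp only [convertLoopA, PySem.Int.mod_eq_emod_of_pos (show (0:Int) < 2 by norm_num),
    Int.shiftRight_eq_div_pow]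
  norm_num
  refine ⟨?_, ?_, ?_, ?_, ?_, ?_, ?_⟩ <;> exact if_congr (by omega) rfl rfl

theorem alt_mod (n : Int) :
    convert_num_code_alt n = convert_num_code_alt (n % 256) := by
  have h : PySem.Int.mod (n % 256) 256 = PySem.Int.mod n 256 := by
    rw [PySem.Int.mod_eq_emod_of_pos (show (0:Int) < 256 by norm_num),
      PySem.Int.mod_eq_emod_of_pos (show (0:Int) < 256 by norm_num)]
    omega
  simp only [convert_num_code_alt, h]

set_option maxHeartbeats 2000000 in
set_option maxRecDepth 4096 in
theorem eq_on_residues :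
    ∀ m : Fin 256, convert_num_code ((m : Nat) : Int) = convert_num_code_alt ((m : Nat) : Int) := by
  decide

-- ===== VERDICT (by name: the statement is the Claim_ definition above) =====
theorem convert_num_code_spec : Claim_equal_convert_num_code := by
  intro n _
  unfold Spec_convert_num_code
  have hr : 0 ≤ n % 256 ∧ n % 256 < 256 := by omega
  have hm : n % 256 = (((n % 256).toNat : Nat) : Int) := by omega
  have hfin : (n % 256).toNat < 256 := by omega
  have := eq_on_residues ⟨(n % 256).toNat, hfin⟩
  unfold convert_num_code at this ⊢
  rw [convertLoopA_mod, alt_mod, hm]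
  exact this
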